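-- pv_equiv track=rewrite | github.com/mungmungko/Backjoon-step | 일반수학1/17425_약수의합.py | precalculate_g
-- ===== SOURCE A (Python) =====
-- def precalculate_g(max_N):
--     f_values = [0] * (max_N+1)
--     g_values = [0] * (max_N+1)
--
--     for i in range(1, max_N + 1):
--         for j in range(i, max_N + 1, i):
--             f_values[j] += i
--         g_values[i] = g_values[i-1] + f_values[i]
--     return g_values
--
-- max_N = 1000000
--
-- g_values = precalculate_g(max_N)
-- ===== SOURCE B (Python) =====
-- def precalculate_g(max_N):
--     n = max_N + 1
--     f = [0] * n
--     d = 1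
--     while d * d < n:
--         f[d * d] += d
--         for m in range(d * (d + 1), n, d):
--             f[m] += d + m // d
--         d += 1
--     g = []
--     acc = 0
--     for v in f:
--         acc += v
--         g.append(acc)
--     return g
-- ===== Notes on version B (the rewrite author's own statement) =====
-- stated objective: alternative
-- what changed: Replaces A's full harmonic sieve (every divisor d added to every multiple, interleaved with the running prefix sum) by a square-root pairing sieve that enumerates each divisor pair (d, m//d) once starting at d*d, followed by a separate prefix-sum pass.
import Mathlib
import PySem

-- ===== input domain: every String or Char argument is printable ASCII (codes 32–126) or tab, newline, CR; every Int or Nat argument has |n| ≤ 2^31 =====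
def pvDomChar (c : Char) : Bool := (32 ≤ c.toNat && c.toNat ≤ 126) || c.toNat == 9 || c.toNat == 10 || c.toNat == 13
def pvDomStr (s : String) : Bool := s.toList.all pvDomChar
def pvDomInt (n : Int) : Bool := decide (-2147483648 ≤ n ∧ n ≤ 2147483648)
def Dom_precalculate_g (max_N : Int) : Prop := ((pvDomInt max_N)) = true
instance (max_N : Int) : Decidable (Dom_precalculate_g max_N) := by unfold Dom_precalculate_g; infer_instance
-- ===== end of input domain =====

-- B replaces A's full harmonic sieve (interleaved with the running prefix sum) by a
-- square-root pairing sieve adding each divisor pair (d, m//d) once from d*d,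
-- followed by a separate prefix-sum pass.

-- ===== PORT A =====
-- loop body of "for i in range(1, max_N+1)": inner sieve pass, then g[i] = g[i-1] + f[i]
def pvStepA (n : Int) (st : List Int × List Int) (i : Int) : List Int × List Int :=
  let f := (PySem.List.pyRange i n i).foldl
    (fun f j => PySem.List.pySetD f j (PySem.List.pyGetD f j 0 + i)) st.1
  (f, PySem.List.pySetD st.2 i
      (PySem.List.pyGetD st.2 (i - 1) 0 + PySem.List.pyGetD f i 0))

def precalculate_g (max_N : Int) : List Int :=
  ((PySem.List.pyRange 1 (max_N + 1) 1).foldl (pvStepA (max_N + 1))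
    (List.replicate (max_N + 1).toNat (0 : Int),
     List.replicate (max_N + 1).toNat (0 : Int))).2

-- ===== PORT B =====
-- while d*d < n: f[d*d] += d; for m in range(d*(d+1), n, d): f[m] += d + m//d; d += 1
def pvSieveB (n d : Int) (f : List Int) : List Int :=
  if _h : d * d < n then
    pvSieveB n (d + 1)
      ((PySem.List.pyRange (d * (d + 1)) n d).foldl
        (fun fa m => PySem.List.pySetD fa m
          (PySem.List.pyGetD fa m 0 + (d + PySem.Int.floordiv m d)))
        (PySem.List.pySetD f (d * d) (PySem.List.pyGetD f (d * d) 0 + d)))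
  else f
termination_by (n - d).toNat
decreasing_by
  rcases (by omega : d ≤ 0 ∨ 0 < d) with hd | hd
  · have := mul_self_nonneg d; omega
  · have hdd : d ≤ d * d := le_mul_of_one_le_left (by omega) (by omega)
    omega

def precalculate_g_alt (max_N : Int) : List Int :=
  ((pvSieveB (max_N + 1) 1 (List.replicate (max_N + 1).toNat (0 : Int))).foldl
    (fun (st : List Int × Int) v => (st.1 ++ [st.2 + v], st.2 + v)) ([], 0)).1

-- ===== PRECONDITION & SPEC =====
def Spec_precalculate_g (max_N : Int) (out : List Int) : Prop := out = precalculate_g_alt max_N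
instance (max_N : Int) (out : List Int) : Decidable (Spec_precalculate_g max_N out) := by unfold Spec_precalculate_g; infer_instance

-- ===== CLAIM (what is proved, stated in full; the proofs are below) =====
def Claim_equal_precalculate_g : Prop := ∀ (max_N : Int), Dom_precalculate_g max_N → Spec_precalculate_g max_N (precalculate_g max_N)

-- ===== LEMMAS AND PROOFS =====

-- reference values: sigma(m) and its prefix sums, Nat-indexed
def pvDs (k d : Nat) : Int := if d ∣ k ∧ 1 ≤ d then (d : Int) else 0
def pvSig (m : Nat) : Int := ∑ d ∈ Finset.range (m + 1), pvDs m d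
def pvG (k : Nat) : Int := ∑ m ∈ Finset.range (k + 1), pvSig m

-- A-side partial sums (divisors below a)
def pvSigLT (a k : Int) : Int :=
  ((PySem.List.pyRange 1 a 1).map (fun d => if d ∣ k ∧ d ≤ k then d else 0)).sum
def pvGI (i : Int) : Int :=
  ((PySem.List.pyRange 1 (i + 1) 1).map (fun m => pvSigLT (m + 1) m)).sum

-- B-side contributions
def pvContrib (e k : Int) : Int :=
  (if e * e = k then e else 0) +
  (if e ∣ k ∧ e * e < k then e + PySem.Int.floordiv k e else 0)
def pvPair (n d k : Int) : Int :=
  ((PySem.List.pyRange d n 1).map (fun e => pvContrib e k)).sum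
def pvHf (k e : Nat) : Int :=
  (if e * e = k then (e : Int) else 0) +
  (if e ∣ k ∧ e * e < k then ((e : Int) + ((k / e : Nat) : Int)) else 0)

lemma pvGetD_set (l : List Int) (i : Nat) (v : Int) (k : Nat) (hk : k < l.length) :
    (l.set i v).getD k 0 = if i = k then v else l.getD k 0 := by
  rcases eq_or_ne i k with h | h
  · subst h
    rw [if_pos rfl, List.getD_eq_getElem _ 0 (by simpa using hk), List.getElem_set_self]
  · rw [if_neg h, List.getD_eq_getElem _ 0 (by simpa using hk),
      List.getD_eq_getElem _ 0 hk, List.getElem_set_ne h]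

lemma pvRepGetD (t m : Nat) : (List.replicate t (0 : Int)).getD m 0 = 0 := by
  rw [List.getD_eq_getElem?_getD, List.getElem?_replicate]
  split <;> rfl

lemma pvSumRange (t : Nat) (h : Nat → Int) :
    ((List.range t).map h).sum = ∑ k ∈ Finset.range t, h k := by
  induction t with
  | zero => simp
  | succ t ih =>
    rw [List.range_succ, Finset.sum_range_succ, List.map_append, List.sum_append, ih]
    simp

lemma pvNodupRange (a n s : Int) (hs : 0 < s) : (PySem.List.pyRange a n s).Nodup := by
  rw [PySem.List.pyRange_of_pos a n hs]
  refine List.Nodup.map ?_ List.nodup_range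
  intro x y hxy
  have h2 : s * (x : Int) = s * (y : Int) := by linarith
  have h3 := mul_left_cancel₀ (by omega : s ≠ 0) h2
  exact_mod_cast h3

lemma pvMemMult (i n x : Int) (hi : 1 ≤ i) :
    x ∈ PySem.List.pyRange i n i ↔ i ∣ x ∧ i ≤ x ∧ x < n := by
  rw [PySem.List.mem_pyRange_iff_of_pos (by omega)]
  constructor
  · rintro ⟨ha, hb, hc⟩
    refine ⟨?_, ha, hb⟩
    have := dvd_add hc (dvd_refl i)
    simpa using this
  · rintro ⟨hd, ha, hb⟩
    exact ⟨ha, hb, dvd_sub hd (dvd_refl i)⟩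

lemma pvMemMult2 (d n x : Int) (hd : 1 ≤ d) :
    x ∈ PySem.List.pyRange (d * (d + 1)) n d ↔ d ∣ x ∧ d * d < x ∧ x < n := by
  rw [PySem.List.mem_pyRange_iff_of_pos (by omega)]
  constructor
  · rintro ⟨h1, h2, h3⟩
    have hdvd : d ∣ x := by
      have := dvd_add h3 (dvd_mul_right d (d + 1))
      simpa using this
    have hexp : d * (d + 1) = d * d + d := by ring
    exact ⟨hdvd, by omega, h2⟩
  · rintro ⟨hdvd, hlt, hxn⟩
    obtain ⟨q, rfl⟩ := hdvd
    have hq : d < q := lt_of_mul_lt_mul_left hlt (by omega)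
    have h1 : d * (d + 1) ≤ d * q := by
      apply mul_le_mul_of_nonneg_left (by omega) (by omega)
    exact ⟨h1, hxn, dvd_sub (dvd_mul_right d q) (dvd_mul_right d (d + 1))⟩

-- generic: a fold of "f[j] += c j" over distinct nonnegative indices, pointwise
lemma foldl_pySetD_add (c : Int → Int) (F : List Int → Int → List Int)
    (hF : ∀ fa j, F fa j = PySem.List.pySetD fa j (PySem.List.pyGetD fa j 0 + c j)) :
    ∀ (js : List Int) (f : List Int), (∀ j ∈ js, 0 ≤ j) → js.Nodup →
      (js.foldl F f).length = f.length ∧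
      ∀ k : Nat, k < f.length →
        (js.foldl F f).getD k 0 = f.getD k 0 + (if (k : Int) ∈ js then c (k : Int) else 0) := by
  intro js
  induction js with
  | nil => intro f _ _; simp
  | cons j js ih =>
    intro f hpos hnd
    have hj : (0 : Int) ≤ j := hpos j (List.mem_cons_self ..)
    have hnotmem : j ∉ js := (List.nodup_cons.mp hnd).1
    simp only [List.foldl_cons, hF]
    set f' := PySem.List.pySetD f j (PySem.List.pyGetD f j 0 + c j) with hf'
    have hlen : f'.length = f.length := PySem.List.length_pySetD f j _
    obtain ⟨hL, hV⟩ := ih f' (fun x hx => hpos x (List.mem_cons_of_mem _ hx))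
      (List.nodup_cons.mp hnd).2
    refine ⟨hL.trans hlen, fun k hk => ?_⟩
    rw [hV k (by omega)]
    have hf'k : f'.getD k 0 = f.getD k 0 + (if (k : Int) = j then c (k : Int) else 0) := by
      rw [hf', PySem.List.pySetD_of_nonneg f _ hj, pvGetD_set f j.toNat _ k hk]
      rcases eq_or_ne (k : Int) j with h | h
      · rw [if_pos (by omega), if_pos h, PySem.List.pyGetD_of_nonneg f 0 hj]
        have hjk : j.toNat = k := by omega
        rw [hjk, h]
      · rw [if_neg (by omega), if_neg h, add_zero]
    rw [hf'k]
    simp only [List.mem_cons]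
    rcases eq_or_ne (k : Int) j with h | h
    · have hmem : ¬ ((k : Int) ∈ js) := by rw [h]; exact hnotmem
      rw [if_pos h, if_neg hmem, if_pos (Or.inl h)]
      ring
    · rw [if_neg h]
      by_cases hm : (k : Int) ∈ js
      · rw [if_pos hm, if_pos (Or.inr hm)]
        ring
      · rw [if_neg hm, if_neg (by tauto)]
        ring

-- pvSigLT / pvGI recurrences
lemma pvSigLT_one (k : Int) : pvSigLT 1 k = 0 := by
  unfold pvSigLT
  rw [PySem.List.pyRange_one_eq_nil le_rfl]
  simp

lemma pvSigLT_succ (a k : Int) (ha : 1 ≤ a) :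
    pvSigLT (a + 1) k = pvSigLT a k + (if a ∣ k ∧ a ≤ k then a else 0) := by
  unfold pvSigLT
  rw [PySem.List.pyRange_one_succ_right (by omega : (1 : Int) ≤ a)]
  simp

lemma pvGI_zero : pvGI 0 = 0 := by
  unfold pvGI
  rw [PySem.List.pyRange_one_eq_nil (by norm_num)]
  simp

lemma pvGI_succ (a : Int) (ha : 1 ≤ a) : pvGI a = pvGI (a - 1) + pvSigLT (a + 1) a := by
  unfold pvGI
  have h1 : a - 1 + 1 = a := by ring
  rw [h1, PySem.List.pyRange_one_succ_right (by omega : (1 : Int) ≤ a)]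
  simp

-- the main loop of A, pointwise
lemma pvALoop (n : Int) : ∀ (t : Nat) (a : Int) (f g : List Int),
    (n - a).toNat ≤ t → 1 ≤ a → f.length = n.toNat → g.length = n.toNat →
    (∀ k : Nat, k < n.toNat → f.getD k 0 = pvSigLT a (k : Int)) →
    (∀ k : Nat, k < n.toNat → g.getD k 0 = if (k : Int) < a then pvGI (k : Int) else 0) →
    ((PySem.List.pyRange a n 1).foldl (pvStepA n) (f, g)).2.length = n.toNat ∧
    ∀ k : Nat, k < n.toNat →
      ((PySem.List.pyRange a n 1).foldl (pvStepA n) (f, g)).2.getD k 0 = pvGI (k : Int) := by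
  intro t
  induction t with
  | zero =>
    intro a f g ht ha hf hg hfv hgv
    have hna : n ≤ a := by omega
    rw [PySem.List.pyRange_one_eq_nil hna]
    exact ⟨hg, fun k hk => by rw [List.foldl_nil, hgv k hk, if_pos (by omega)]⟩
  | succ t ih =>
    intro a f g ht ha hf hg hfv hgv
    by_cases hna : n ≤ a
    · rw [PySem.List.pyRange_one_eq_nil hna]
      exact ⟨hg, fun k hk => by rw [List.foldl_nil, hgv k hk, if_pos (by omega)]⟩
    · rw [not_le] at hna
      rw [PySem.List.pyRange_one_cons hna]
      simp only [List.foldl_cons]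
      have hinner := foldl_pySetD_add (fun _ => a)
        (fun f j => PySem.List.pySetD f j (PySem.List.pyGetD f j 0 + a))
        (fun fa j => rfl)
        (PySem.List.pyRange a n a) f
        (fun j hj => by
          have hm := (pvMemMult a n j ha).mp hj
          omega)
        (pvNodupRange a n a (by omega))
      have hstep : pvStepA n (f, g) a =
          ((PySem.List.pyRange a n a).foldl
            (fun f j => PySem.List.pySetD f j (PySem.List.pyGetD f j 0 + a)) f,
           PySem.List.pySetD g a
            (PySem.List.pyGetD g (a - 1) 0 +
             PySem.List.pyGetD ((PySem.List.pyRange a n a).foldl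
               (fun f j => PySem.List.pySetD f j (PySem.List.pyGetD f j 0 + a)) f) a 0)) := rfl
      rw [hstep]
      set F := (PySem.List.pyRange a n a).foldl
        (fun f j => PySem.List.pySetD f j (PySem.List.pyGetD f j 0 + a)) f with hFdef
      have hFlen : F.length = n.toNat := hinner.1.trans hf
      have hFv : ∀ k : Nat, k < n.toNat → F.getD k 0 = pvSigLT (a + 1) (k : Int) := by
        intro k hk
        rw [hinner.2 k (by omega), pvSigLT_succ a _ ha, hfv k hk]
        congr 1
        have hkn : (k : Int) < n := by omega
        have hiff : ((k : Int) ∈ PySem.List.pyRange a n a) ↔ (a ∣ (k : Int) ∧ a ≤ (k : Int)) := by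
          rw [pvMemMult a n _ ha]
          tauto
        exact if_congr hiff rfl rfl
      have hval : PySem.List.pyGetD g (a - 1) 0 + PySem.List.pyGetD F a 0 = pvGI a := by
        have h1 : PySem.List.pyGetD g (a - 1) 0 = pvGI (a - 1) := by
          rw [PySem.List.pyGetD_of_nonneg g 0 (by omega : (0 : Int) ≤ a - 1)]
          have hlt : (a - 1).toNat < n.toNat := by omega
          rw [hgv (a - 1).toNat hlt, if_pos (by omega)]
          congr 1
          omega
        have h2 : PySem.List.pyGetD F a 0 = pvSigLT (a + 1) a := by
          rw [PySem.List.pyGetD_of_nonneg F 0 (by omega : (0 : Int) ≤ a)]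
          have hlt : a.toNat < n.toNat := by omega
          rw [hFv a.toNat hlt]
          congr 1
          omega
        rw [h1, h2, ← pvGI_succ a ha]
      rw [hval]
      exact ih (a + 1) F (PySem.List.pySetD g a (pvGI a))
        (by omega) (by omega) hFlen
        ((PySem.List.length_pySetD g a _).trans hg)
        (fun k hk => hFv k hk)
        (fun k hk => by
          rw [PySem.List.pySetD_of_nonneg g _ (by omega : (0 : Int) ≤ a),
            pvGetD_set g a.toNat _ k (by omega)]
          rcases eq_or_ne a.toNat k with h | h
          · rw [if_pos h, if_pos (by omega)]
            congr 1
            omega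
          · rw [if_neg h, hgv k hk]
            by_cases hlt : (k : Int) < a
            · rw [if_pos hlt, if_pos (by omega)]
            · rw [if_neg hlt, if_neg (by omega)])

-- bridge: fully truncated sigma equals pvSig
lemma pvSigLT_full (k : Nat) (a : Int) (ha : (k : Int) < a) :
    pvSigLT a (k : Int) = pvSig k := by
  have h1 : pvSigLT a (k : Int) = pvSigLT ((k : Int) + 1) (k : Int) := by
    unfold pvSigLT
    rw [PySem.List.pyRange_one_append 1 ((k : Int) + 1) a (by omega) (by omega),
      List.map_append, List.sum_append]
    have hz : ((PySem.List.pyRange ((k : Int) + 1) a 1).map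
        (fun d => if d ∣ (k : Int) ∧ d ≤ (k : Int) then d else 0)).sum = 0 := by
      apply List.sum_eq_zero
      intro x hx
      obtain ⟨d, hd, rfl⟩ := List.mem_map.mp hx
      have hm := PySem.List.mem_pyRange_one.mp hd
      rw [if_neg (by omega)]
    rw [hz, add_zero]
  rw [h1]
  unfold pvSigLT pvSig
  rw [PySem.List.pyRange_one 1 ((k : Int) + 1)]
  have ht : ((k : Int) + 1 - 1).toNat = k := by omega
  rw [ht, List.map_map, pvSumRange, Finset.sum_range_succ']
  have h0 : pvDs k 0 = 0 := by unfold pvDs; rw [if_neg (by omega)]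
  rw [h0, add_zero]
  apply Finset.sum_congr rfl
  intro j hj
  have hjk : j < k := Finset.mem_range.mp hj
  simp only [Function.comp_apply]
  unfold pvDs
  have hcast : (1 : Int) + (j : Int) = ((j + 1 : Nat) : Int) := by push_cast; ring
  rw [hcast]
  rcases Classical.em ((j + 1) ∣ k) with hdvd | hdvd
  · rw [if_pos ⟨by exact_mod_cast hdvd, by exact_mod_cast Nat.le_of_dvd (by omega) hdvd⟩,
      if_pos ⟨hdvd, by omega⟩]
  · rw [if_neg (by
        rintro ⟨hx, _⟩
        exact hdvd (by exact_mod_cast hx)),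
      if_neg (by tauto)]

lemma pvSig_zero : pvSig 0 = 0 := by
  unfold pvSig pvDs
  simp

lemma pvGI_nat (k : Nat) : pvGI (k : Int) = pvG k := by
  unfold pvGI pvG
  rw [PySem.List.pyRange_one 1 ((k : Int) + 1)]
  have ht : ((k : Int) + 1 - 1).toNat = k := by omega
  rw [ht, List.map_map, pvSumRange, Finset.sum_range_succ', pvSig_zero, add_zero]
  apply Finset.sum_congr rfl
  intro j hj
  simp only [Function.comp_apply]
  have hcast : (1 : Int) + (j : Int) = ((j + 1 : Nat) : Int) := by push_cast; ring
  rw [hcast, pvSigLT_full (j + 1) (((j + 1 : Nat) : Int) + 1) (by omega)]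

-- A's final characterization
lemma pvAChar (max_N : Int) :
    precalculate_g max_N = (List.range (max_N + 1).toNat).map (fun k => pvG k) := by
  unfold precalculate_g
  have hloop := pvALoop (max_N + 1) (max_N + 1 - 1).toNat 1
    (List.replicate (max_N + 1).toNat (0 : Int))
    (List.replicate (max_N + 1).toNat (0 : Int))
    (by omega) le_rfl (by simp) (by simp)
    (fun k hk => by rw [pvRepGetD, pvSigLT_one])
    (fun k hk => by
      rcases Nat.eq_zero_or_pos k with h | h
      · subst h
        rw [pvRepGetD, if_pos (by norm_num)]
        rw [show ((0 : Nat) : Int) = 0 from rfl, pvGI_zero]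
      · rw [pvRepGetD, if_neg (by omega)])
  apply List.ext_getElem
  · rw [hloop.1]; simp
  · intro k h1 h2
    have hk : k < (max_N + 1).toNat := by simpa using h2
    rw [← List.getD_eq_getElem _ 0 h1, hloop.2 k hk]
    simp only [List.getElem_map, List.getElem_range]
    exact pvGI_nat k

-- B: the sieve loop, pointwise
lemma pvContrib_zero (e : Int) (k : Nat) (hk : (k : Int) < e * e) :
    pvContrib e (k : Int) = 0 := by
  unfold pvContrib
  rw [if_neg (by omega), if_neg (by rintro ⟨_, h⟩; omega)]
  simp

lemma pvPairZero (n d : Int) (k : Nat) (hd : 1 ≤ d) (hnd : ¬ d * d < n) (hk : (k : Int) < n) :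
    pvPair n d (k : Int) = 0 := by
  unfold pvPair
  apply List.sum_eq_zero
  intro x hx
  obtain ⟨e, he, rfl⟩ := List.mem_map.mp hx
  have hmem := PySem.List.mem_pyRange_one.mp he
  have hee : d * d ≤ e * e := mul_le_mul hmem.1 hmem.1 (by omega) (by omega)
  exact pvContrib_zero e k (by omega)

lemma pvPair_cons (n d k : Int) (hdn : d < n) :
    pvPair n d k = pvContrib d k + pvPair n (d + 1) k := by
  unfold pvPair
  rw [PySem.List.pyRange_one_cons hdn]
  simp

lemma pvBLoop (n : Int) : ∀ (t : Nat) (d : Int) (f : List Int),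
    (n - d).toNat ≤ t → 1 ≤ d → f.length = n.toNat →
    (pvSieveB n d f).length = n.toNat ∧
    ∀ k : Nat, k < n.toNat →
      (pvSieveB n d f).getD k 0 = f.getD k 0 + pvPair n d (k : Int) := by
  intro t
  induction t with
  | zero =>
    intro d f ht hd hf
    have hdd : d ≤ d * d := le_mul_of_one_le_left (by omega) hd
    have hnd : ¬ d * d < n := by omega
    rw [pvSieveB.eq_def, dif_neg hnd]
    exact ⟨hf, fun k hk => by rw [pvPairZero n d k hd hnd (by omega), add_zero]⟩
  | succ t ih =>
    intro d f ht hd hf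
    have hdd : d ≤ d * d := le_mul_of_one_le_left (by omega) hd
    by_cases hlt : d * d < n
    · rw [pvSieveB.eq_def, dif_pos hlt]
      have hf1len : (PySem.List.pySetD f (d * d)
          (PySem.List.pyGetD f (d * d) 0 + d)).length = n.toNat :=
        (PySem.List.length_pySetD f _ _).trans hf
      have hf1v : ∀ k : Nat, k < n.toNat →
          (PySem.List.pySetD f (d * d) (PySem.List.pyGetD f (d * d) 0 + d)).getD k 0
            = f.getD k 0 + (if d * d = (k : Int) then d else 0) := by
        intro k hk
        rw [PySem.List.pySetD_of_nonneg f _ (by omega : (0 : Int) ≤ d * d),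
          pvGetD_set f (d * d).toNat _ k (by omega)]
        rcases eq_or_ne (d * d).toNat k with h | h
        · rw [if_pos h, if_pos (by omega),
            PySem.List.pyGetD_of_nonneg f 0 (by omega : (0 : Int) ≤ d * d), h]
        · rw [if_neg h, if_neg (by omega), add_zero]
      have hinner := foldl_pySetD_add (fun m => d + PySem.Int.floordiv m d)
        (fun fa m => PySem.List.pySetD fa m
          (PySem.List.pyGetD fa m 0 + (d + PySem.Int.floordiv m d)))
        (fun fa m => rfl)
        (PySem.List.pyRange (d * (d + 1)) n d)
        (PySem.List.pySetD f (d * d) (PySem.List.pyGetD f (d * d) 0 + d))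
        (fun j hj => by
          have hm := (pvMemMult2 d n j hd).mp hj
          have h0 : (0 : Int) ≤ d * d := by omega
          omega)
        (pvNodupRange _ n d (by omega))
      set f2 := (PySem.List.pyRange (d * (d + 1)) n d).foldl
        (fun fa m => PySem.List.pySetD fa m
          (PySem.List.pyGetD fa m 0 + (d + PySem.Int.floordiv m d)))
        (PySem.List.pySetD f (d * d) (PySem.List.pyGetD f (d * d) 0 + d)) with hf2
      have hf2len : f2.length = n.toNat := hinner.1.trans hf1len
      have hf2v : ∀ k : Nat, k < n.toNat →
          f2.getD k 0 = f.getD k 0 + pvContrib d (k : Int) := by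
        intro k hk
        rw [hinner.2 k (by omega), hf1v k hk]
        beta_reduce
        have hkn : (k : Int) < n := by omega
        have hiff : ((k : Int) ∈ PySem.List.pyRange (d * (d + 1)) n d) ↔
            (d ∣ (k : Int) ∧ d * d < (k : Int)) := by
          rw [pvMemMult2 d n _ hd]
          tauto
        rw [if_congr hiff rfl rfl]
        unfold pvContrib
        ring
      obtain ⟨hL, hV⟩ := ih (d + 1) f2 (by omega) (by omega) hf2len
      refine ⟨hL, fun k hk => ?_⟩
      rw [hV k hk, hf2v k hk, pvPair_cons n d _ (by omega)]
      ring
    · rw [pvSieveB.eq_def, dif_neg hlt]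
      exact ⟨hf, fun k hk => by rw [pvPairZero n d k hd hlt (by omega), add_zero]⟩

-- prefix-sum pass of B
lemma pvPrefix : ∀ (xs out : List Int) (acc : Int),
    (xs.foldl (fun (st : List Int × Int) v => (st.1 ++ [st.2 + v], st.2 + v)) (out, acc)).1
    = out ++ (List.range xs.length).map (fun k => acc + (xs.take (k + 1)).sum) := by
  intro xs
  induction xs with
  | nil => intro out acc; simp
  | cons v xs ih =>
    intro out acc
    simp only [List.foldl_cons]
    rw [ih]
    simp only [List.length_cons, List.range_succ_eq_map, List.map_cons, List.map_map]
    rw [List.append_assoc]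
    congr 1
    simp only [List.singleton_append, List.take_succ_cons, List.sum_cons]
    congr 1
    · simp
    · apply List.map_congr_left
      intro b _
      simp only [Function.comp_apply]
      ring

lemma pvTakeSum : ∀ (f : List Int) (k : Nat), k < f.length →
    (f.take (k + 1)).sum = ∑ m ∈ Finset.range (k + 1), f.getD m 0 := by
  intro f k
  induction k with
  | zero =>
    intro hk
    match f, hk with
    | x :: xs, _ => simp
  | succ k ih =>
    intro hk
    rw [List.take_add_one, List.sum_append, Finset.sum_range_succ, ih (by omega),
      List.getElem?_eq_getElem hk, List.getD_eq_getElem _ 0 hk]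
    simp

-- the pairing identity, over Nat
lemma pvCore (k T : Nat) (hk1 : 1 ≤ k) (hkT : k < T) :
    ∑ e ∈ Finset.range T, pvHf k e = ∑ d ∈ Finset.range T, pvDs k d := by
  classical
  have hk0 : k ≠ 0 := by omega
  have hDk : ∀ {d : Nat}, d ∣ k → d < T := fun hd =>
    lt_of_le_of_lt (Nat.le_of_dvd (by omega) hd) hkT
  have hsplit : ∀ e : Nat, pvHf k e
      = (if e * e = k then (e : Int) else 0) +
        ((if e ∣ k ∧ e * e < k then (e : Int) else 0) +
         (if e ∣ k ∧ e * e < k then ((k / e : Nat) : Int) else 0)) := by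
    intro e; unfold pvHf; split <;> split <;> simp
  simp only [hsplit]
  rw [Finset.sum_add_distrib, Finset.sum_add_distrib]
  have hRHS : ∑ d ∈ Finset.range T, pvDs k d = ∑ d ∈ k.divisors, (d : Int) := by
    unfold pvDs
    rw [← Finset.sum_filter]
    apply Finset.sum_congr ?_ (fun _ _ => rfl)
    ext d
    simp only [Finset.mem_filter, Finset.mem_range, Nat.mem_divisors]
    constructor
    · rintro ⟨_, hd, _⟩; exact ⟨hd, hk0⟩
    · rintro ⟨hd, _⟩
      exact ⟨hDk hd, hd, Nat.pos_of_dvd_of_pos hd (by omega)⟩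
  have hE : ∑ e ∈ Finset.range T, (if e * e = k then (e : Int) else 0)
      = ∑ d ∈ k.divisors.filter (fun d => d * d = k), (d : Int) := by
    rw [← Finset.sum_filter]
    apply Finset.sum_congr ?_ (fun _ _ => rfl)
    ext e
    simp only [Finset.mem_filter, Finset.mem_range, Nat.mem_divisors]
    constructor
    · rintro ⟨_, he⟩
      exact ⟨⟨Dvd.intro e he, hk0⟩, he⟩
    · rintro ⟨⟨hd, _⟩, he⟩
      exact ⟨hDk hd, he⟩
  have hsetS : (Finset.range T).filter (fun e => e ∣ k ∧ e * e < k)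
      = k.divisors.filter (fun d => d * d < k) := by
    ext e
    simp only [Finset.mem_filter, Finset.mem_range, Nat.mem_divisors]
    constructor
    · rintro ⟨_, hd, he⟩; exact ⟨⟨hd, hk0⟩, he⟩
    · rintro ⟨⟨hd, _⟩, he⟩; exact ⟨hDk hd, hd, he⟩
  have hS : ∑ e ∈ Finset.range T, (if e ∣ k ∧ e * e < k then (e : Int) else 0)
      = ∑ d ∈ k.divisors.filter (fun d => d * d < k), (d : Int) := by
    rw [← Finset.sum_filter, hsetS]
  have hC : ∑ e ∈ Finset.range T, (if e ∣ k ∧ e * e < k then ((k / e : Nat) : Int) else 0)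
      = ∑ d ∈ k.divisors.filter (fun d => k < d * d), (d : Int) := by
    rw [← Finset.sum_filter, hsetS]
    apply Finset.sum_nbij' (i := fun d => k / d) (j := fun d => k / d)
    · intro a ha
      simp only [Finset.mem_filter, Nat.mem_divisors] at ha ⊢
      obtain ⟨⟨hd, _⟩, haa⟩ := ha
      have ha1 : 0 < a := Nat.pos_of_dvd_of_pos hd (by omega)
      obtain ⟨q, rfl⟩ := hd
      rw [Nat.mul_div_cancel_left q ha1]
      have hq : a < q := Nat.lt_of_mul_lt_mul_left haa
      refine ⟨⟨dvd_mul_left q a, hk0⟩, ?_⟩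
      have := (Nat.mul_lt_mul_right (by omega : 0 < q)).mpr hq
      omega
    · intro a ha
      simp only [Finset.mem_filter, Nat.mem_divisors] at ha ⊢
      obtain ⟨⟨hd, _⟩, haa⟩ := ha
      have ha1 : 0 < a := Nat.pos_of_dvd_of_pos hd (by omega)
      obtain ⟨q, rfl⟩ := hd
      rw [Nat.mul_div_cancel_left q ha1]
      have hq0 : 0 < q := Nat.pos_of_ne_zero (fun h => hk0 (by simp [h]))
      have hq : q < a := by
        by_contra hcon
        rw [Nat.not_lt] at hcon
        have := Nat.mul_le_mul_left a hcon
        omega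
      refine ⟨⟨dvd_mul_left q a, hk0⟩, ?_⟩
      have := (Nat.mul_lt_mul_right hq0).mpr hq
      omega
    · intro a ha
      simp only [Finset.mem_filter, Nat.mem_divisors] at ha
      exact Nat.div_div_self ha.1.1 hk0
    · intro a ha
      simp only [Finset.mem_filter, Nat.mem_divisors] at ha
      exact Nat.div_div_self ha.1.1 hk0
    · intro a _; rfl
  rw [hE, hS, hC, hRHS]
  have h1 := Finset.sum_filter_add_sum_filter_not k.divisors (fun d => d * d < k)
    (fun d => (d : Int))
  have h2 := Finset.sum_filter_add_sum_filter_not (k.divisors.filter (fun d => ¬ d * d < k))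
    (fun d => d * d = k) (fun d => (d : Int))
  rw [Finset.filter_filter, Finset.filter_filter] at h2
  have he1 : k.divisors.filter (fun a => ¬ a * a < k ∧ a * a = k)
      = k.divisors.filter (fun d => d * d = k) := by
    apply Finset.filter_congr
    intro d _
    constructor
    · rintro ⟨_, h⟩; exact h
    · intro h; exact ⟨by omega, h⟩
  have he2 : k.divisors.filter (fun a => ¬ a * a < k ∧ ¬ a * a = k)
      = k.divisors.filter (fun d => k < d * d) := by
    apply Finset.filter_congr
    intro d _
    constructor
    · rintro ⟨hx, hy⟩; omega
    · intro h; exact ⟨by omega, by omega⟩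
  rw [he1, he2] at h2
  linarith

-- pairing at the list level
lemma pvPair_eq_sig (n : Int) (k : Nat) (hkn : (k : Int) < n) :
    pvPair n 1 (k : Int) = pvSig k := by
  rcases Nat.eq_zero_or_pos k with hk0 | hk1
  · subst hk0
    rw [pvSig_zero]
    unfold pvPair
    apply List.sum_eq_zero
    intro x hx
    obtain ⟨e, he, rfl⟩ := List.mem_map.mp hx
    have hmem := PySem.List.mem_pyRange_one.mp he
    exact pvContrib_zero e 0 (by push_cast; nlinarith [hmem.1])
  · unfold pvPair
    rw [PySem.List.pyRange_one 1 n, List.map_map, pvSumRange]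
    have hkT : k < (n - 1).toNat + 1 := by omega
    have hstep : ∀ j : Nat,
        ((fun e => pvContrib e (k : Int)) ∘ (fun j : Nat => 1 + (j : Int))) j = pvHf k (j + 1) := by
      intro j
      simp only [Function.comp_apply]
      unfold pvContrib pvHf
      have hcast : (1 : Int) + (j : Int) = ((j + 1 : Nat) : Int) := by push_cast; ring
      rw [hcast]
      congr 1
      · rcases Classical.em ((j + 1) * (j + 1) = k) with h | h
        · rw [if_pos (by exact_mod_cast h), if_pos h]
        · rw [if_neg (by
              intro hx
              exact h (by exact_mod_cast hx)), if_neg h]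
      · rcases Classical.em ((j + 1) ∣ k ∧ (j + 1) * (j + 1) < k) with h | h
        · rw [if_pos ⟨by exact_mod_cast h.1, by exact_mod_cast h.2⟩, if_pos h,
            PySem.Int.floordiv_natCast k (j + 1)]
        · rw [if_neg (by
              rintro ⟨h1, h2⟩
              exact h ⟨by exact_mod_cast h1, by exact_mod_cast h2⟩), if_neg h]
    rw [Finset.sum_congr rfl (fun j _ => hstep j)]
    have hsum : ∑ j ∈ Finset.range (n - 1).toNat, pvHf k (j + 1)
        = ∑ e ∈ Finset.range ((n - 1).toNat + 1), pvHf k e := by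
      rw [Finset.sum_range_succ']
      have h0 : pvHf k 0 = 0 := by
        unfold pvHf
        rw [if_neg (by omega), if_neg (by
          rintro ⟨h, _⟩
          exact absurd (Nat.eq_zero_of_zero_dvd h) (by omega))]
        simp
      rw [h0, add_zero]
    rw [hsum, pvCore k ((n - 1).toNat + 1) hk1 hkT]
    unfold pvSig
    have hsub : Finset.range (k + 1) ⊆ Finset.range ((n - 1).toNat + 1) := by
      intro x hx
      simp only [Finset.mem_range] at hx ⊢
      omega
    refine (Finset.sum_subset hsub ?_).symm
    intro x hx hnx
    simp only [Finset.mem_range] at hx hnx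
    unfold pvDs
    have hno : ¬ (x ∣ k ∧ 1 ≤ x) := by
      rintro ⟨hdvd, hx1⟩
      have hle := Nat.le_of_dvd (by omega) hdvd
      omega
    rw [if_neg hno]

-- B's final characterization
lemma pvBChar (max_N : Int) :
    precalculate_g_alt max_N = (List.range (max_N + 1).toNat).map (fun k => pvG k) := by
  unfold precalculate_g_alt
  have hsieve := pvBLoop (max_N + 1) (max_N + 1 - 1).toNat 1
    (List.replicate (max_N + 1).toNat (0 : Int)) (by omega) le_rfl (by simp)
  rw [pvPrefix, List.nil_append, hsieve.1]
  apply List.map_congr_left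
  intro k hk
  have hkm : k < (max_N + 1).toNat := List.mem_range.mp hk
  rw [zero_add, pvTakeSum _ k (by omega)]
  unfold pvG
  apply Finset.sum_congr rfl
  intro m hm
  have hmm : m < k + 1 := Finset.mem_range.mp hm
  rw [hsieve.2 m (by omega), pvRepGetD, zero_add,
    pvPair_eq_sig (max_N + 1) m (by omega)]

-- ===== VERDICT (by name: the statement is the Claim_ definition above) =====
theorem precalculate_g_spec : Claim_equal_precalculate_g := by
  intro max_N _
  unfold Spec_precalculate_g
  rw [pvAChar, pvBChar]
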